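-- pv_equiv track=rewrite | github.com/fiat24/pipboy | scripts/extract_pipboy_shell.py | estimate_background_color
-- ===== SOURCE A (Python) =====
-- from collections import Counter, deque
--
-- def quantize_color(rgb: tuple[int, int, int], step: int = 8) -> tuple[int, int, int]:
--     return tuple((c // step) * step for c in rgb)
--
-- def estimate_background_color(pixels: list[tuple[int, int, int]], w: int, h: int) -> tuple[int, int, int]:
--     border = []
--     for x in range(w):
--         border.append(pixels[x])
--         border.append(pixels[(h - 1) * w + x])
--     for y in range(h):
--         border.append(pixels[y * w])
--         border.append(pixels[y * w + (w - 1)])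
--
--     buckets = Counter(quantize_color(px) for px in border)
--     dominant_bucket, _ = buckets.most_common(1)[0]
--
--     matched = [px for px in border if quantize_color(px) == dominant_bucket]
--     if not matched:
--         return dominant_bucket
--
--     r = sum(px[0] for px in matched) // len(matched)
--     g = sum(px[1] for px in matched) // len(matched)
--     b = sum(px[2] for px in matched) // len(matched)
--     return (r, g, b)
-- ===== SOURCE B (Python) =====
-- def estimate_background_color(pixels: list[tuple[int, int, int]], w: int, h: int) -> tuple[int, int, int]:
--     # One pass over the border pixels: per quantized bucket keep [count, sum_r, sum_g, sum_b].
--     stats = {}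
--
--     def add(px):
--         q = (px[0] // 8 * 8, px[1] // 8 * 8, px[2] // 8 * 8)
--         s = stats.get(q)
--         if s is None:
--             stats[q] = [1, px[0], px[1], px[2]]
--         else:
--             s[0] += 1
--             s[1] += px[0]
--             s[2] += px[1]
--             s[3] += px[2]
--
--     for x in range(w):
--         add(pixels[x])
--         add(pixels[(h - 1) * w + x])
--     for y in range(h):
--         add(pixels[y * w])
--         add(pixels[y * w + (w - 1)])
--
--     best = None
--     for s in stats.values():
--         if best is None or s[0] > best[0]:
--             best = s
--     c, sr, sg, sb = best
--     return (sr // c, sg // c, sb // c)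
-- ===== Notes on version B (the rewrite author's own statement) =====
-- stated objective: simpler
-- what changed: Single pass over the border keeping per-bucket [count,sum_r,sum_g,sum_b] accumulators in an insertion-ordered dict, then one strict-greater scan of the values; this removes the Counter, the matched-filter comprehension and the re-quantization of every border pixel.
import Mathlib
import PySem

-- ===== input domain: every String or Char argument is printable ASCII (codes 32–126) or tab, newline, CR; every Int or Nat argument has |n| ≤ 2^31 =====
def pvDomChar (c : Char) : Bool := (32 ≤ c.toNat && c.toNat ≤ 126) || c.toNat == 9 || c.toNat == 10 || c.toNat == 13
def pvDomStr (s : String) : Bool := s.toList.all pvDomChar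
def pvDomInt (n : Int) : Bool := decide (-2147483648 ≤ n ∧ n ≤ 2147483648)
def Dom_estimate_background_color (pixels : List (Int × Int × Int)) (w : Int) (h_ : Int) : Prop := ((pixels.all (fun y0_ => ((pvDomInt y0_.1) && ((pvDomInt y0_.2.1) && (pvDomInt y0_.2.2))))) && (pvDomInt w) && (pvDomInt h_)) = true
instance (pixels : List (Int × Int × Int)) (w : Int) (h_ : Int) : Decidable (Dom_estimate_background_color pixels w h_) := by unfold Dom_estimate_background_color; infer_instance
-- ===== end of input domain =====

-- B replaces A's Counter + matched-filter + three sum passes by ONE aggregation pass over the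
-- border keeping per-bucket (count, sum_r, sum_g, sum_b) in an insertion-ordered dict, then a
-- single strict-greater scan of the values (objective: simpler).

-- ===== PORT A =====
def quantize_color (rgb : Int × Int × Int) (step : Int) : Int × Int × Int :=
  (PySem.Int.floordiv rgb.1 step * step,
   PySem.Int.floordiv rgb.2.1 step * step,
   PySem.Int.floordiv rgb.2.2 step * step)

-- border-building loop body: pixels[i1], pixels[i2] appended; none = IndexError
def aBody (pixels : List (Int × Int × Int)) (acc : Option (List (Int × Int × Int)))
    (i1 i2 : Int) : Option (List (Int × Int × Int)) :=
  match acc, PySem.List.pyGet? pixels i1, PySem.List.pyGet? pixels i2 with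
  | some b, some p1, some p2 => some (b ++ [p1, p2])
  | _, _, _ => none

-- everything after the two border loops (Counter, most_common(1), matched, the three sums)
def aCore (border : List (Int × Int × Int)) : Int × Int × Int :=
  let buckets := PySem.Dict.counter (border.map (fun px => quantize_color px 8))
  match PySem.List.max? buckets.items (fun kv => kv.2) with
  | none => (0, 0, 0)            -- unreachable under Pre_: most_common(1)[0] raises IndexError
  | some dom =>
    let matched := border.filter (fun px => quantize_color px 8 == dom.1)
    if matched = [] then dom.1
    else
      (PySem.Int.floordiv ((matched.map (fun px => px.1)).sum) matched.length,
       PySem.Int.floordiv ((matched.map (fun px => px.2.1)).sum) matched.length,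
       PySem.Int.floordiv ((matched.map (fun px => px.2.2)).sum) matched.length)

def estimate_background_color (pixels : List (Int × Int × Int)) (w : Int) (h_ : Int) : Int × Int × Int :=
  let b1 := (PySem.List.pyRange 0 w 1).foldl
    (fun acc x => aBody pixels acc x ((h_ - 1) * w + x)) (some [])
  let b2 := (PySem.List.pyRange 0 h_ 1).foldl
    (fun acc y => aBody pixels acc (y * w) (y * w + (w - 1))) b1
  match b2 with
  | none => (0, 0, 0)            -- unreachable under Pre_: Python raises IndexError
  | some border => aCore border

-- ===== PORT B =====
def bQuant (px : Int × Int × Int) : Int × Int × Int :=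
  (PySem.Int.floordiv px.1 8 * 8, PySem.Int.floordiv px.2.1 8 * 8, PySem.Int.floordiv px.2.2 8 * 8)

-- add(px): bump this pixel's bucket accumulator (count, sum_r, sum_g, sum_b)
def bAdd (d : PySem.Dict (Int × Int × Int) (Int × Int × Int × Int)) (px : Int × Int × Int) :
    PySem.Dict (Int × Int × Int) (Int × Int × Int × Int) :=
  match d.get? (bQuant px) with
  | none => d.insert (bQuant px) (1, px.1, px.2.1, px.2.2)
  | some s => d.insert (bQuant px) (s.1 + 1, s.2.1 + px.1, s.2.2.1 + px.2.1, s.2.2.2 + px.2.2)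

-- loop body over one border index pair; none = IndexError
def bBody (pixels : List (Int × Int × Int)) (acc : Option (PySem.Dict (Int × Int × Int) (Int × Int × Int × Int)))
    (i1 i2 : Int) : Option (PySem.Dict (Int × Int × Int) (Int × Int × Int × Int)) :=
  match acc, PySem.List.pyGet? pixels i1, PySem.List.pyGet? pixels i2 with
  | some d, some p1, some p2 => some (bAdd (bAdd d p1) p2)
  | _, _, _ => none

-- after the loops: strict-greater scan of the values, then the three floor divisions
def bCore (stats : PySem.Dict (Int × Int × Int) (Int × Int × Int × Int)) : Int × Int × Int :=
  let best := stats.values.foldl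
    (fun best s => match best with
      | none => some s
      | some b => if b.1 < s.1 then some s else some b) none
  match best with
  | none => (0, 0, 0)            -- unreachable under Pre_: empty dict, Python raises
  | some s => (PySem.Int.floordiv s.2.1 s.1, PySem.Int.floordiv s.2.2.1 s.1, PySem.Int.floordiv s.2.2.2 s.1)

def estimate_background_color_alt (pixels : List (Int × Int × Int)) (w : Int) (h_ : Int) : Int × Int × Int :=
  let d1 := (PySem.List.pyRange 0 w 1).foldl
    (fun acc x => bBody pixels acc x ((h_ - 1) * w + x)) (some PySem.Dict.empty)
  let d2 := (PySem.List.pyRange 0 h_ 1).foldl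
    (fun acc y => bBody pixels acc (y * w) (y * w + (w - 1))) d1
  match d2 with
  | none => (0, 0, 0)
  | some stats => bCore stats

-- ===== PRECONDITION & SPEC =====
-- Pre_ = exactly the inputs where Python A returns: some border pixel exists (else most_common(1)[0]
-- raises IndexError) and every border index is in Python's range (else pixels[i] raises IndexError).
-- (each loop's indices are monotone affine in the loop variable, so "every index in range"
-- is equivalent to the endpoint bounds below)
def Pre_estimate_background_color (pixels : List (Int × Int × Int)) (w : Int) (h_ : Int) : Prop :=
  (0 < w ∨ 0 < h_) ∧
  (0 < w → w ≤ (pixels.length : Int) ∧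
    -(pixels.length : Int) ≤ (h_ - 1) * w ∧ (h_ - 1) * w + (w - 1) < (pixels.length : Int)) ∧
  (0 < h_ → -(pixels.length : Int) ≤ min 0 ((h_ - 1) * w) ∧ max 0 ((h_ - 1) * w) < (pixels.length : Int) ∧
    -(pixels.length : Int) ≤ min (w - 1) ((h_ - 1) * w + (w - 1)) ∧
    max (w - 1) ((h_ - 1) * w + (w - 1)) < (pixels.length : Int))
instance (pixels : List (Int × Int × Int)) (w : Int) (h_ : Int) : Decidable (Pre_estimate_background_color pixels w h_) := by unfold Pre_estimate_background_color; infer_instance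

def pvWitness_estimate_background_color : (List (Int × Int × Int)) × Int × Int := ([(10, 20, 30), (11, 21, 31)], 2, 1)

def Spec_estimate_background_color (pixels : List (Int × Int × Int)) (w : Int) (h_ : Int) (out : Int × Int × Int) : Prop := out = estimate_background_color_alt pixels w h_
instance (pixels : List (Int × Int × Int)) (w : Int) (h_ : Int) (out : Int × Int × Int) : Decidable (Spec_estimate_background_color pixels w h_ out) := by unfold Spec_estimate_background_color; infer_instance

-- ===== CLAIM (what is proved, stated in full; the proofs are below) =====
def Claim_equal_estimate_background_color : Prop := ∀ (pixels : List (Int × Int × Int)) (w : Int) (h_ : Int), Dom_estimate_background_color pixels w h_ → Pre_estimate_background_color pixels w h_ → Spec_estimate_background_color pixels w h_ (estimate_background_color pixels w h_)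


-- ===== LEMMAS AND PROOFS =====

-- spec-level helpers
def mfilter (k : Int × Int × Int) (l : List (Int × Int × Int)) : List (Int × Int × Int) :=
  l.filter (fun px => quantize_color px 8 == k)
def pcnt (k : Int × Int × Int) (l : List (Int × Int × Int)) : Int := ((mfilter k l).length : Int)
def pstat (k : Int × Int × Int) (l : List (Int × Int × Int)) : Int × Int × Int × Int :=
  (pcnt k l, ((mfilter k l).map (fun px => px.1)).sum,
   ((mfilter k l).map (fun px => px.2.1)).sum, ((mfilter k l).map (fun px => px.2.2)).sum)

def bVal (d : PySem.Dict (Int × Int × Int) (Int × Int × Int × Int)) (px : Int × Int × Int) :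
    Int × Int × Int × Int :=
  match d.get? (bQuant px) with
  | none => (1, px.1, px.2.1, px.2.2)
  | some s => (s.1 + 1, s.2.1 + px.1, s.2.2.1 + px.2.1, s.2.2.2 + px.2.2)

theorem bAdd_eq_insert : bAdd = fun d px => d.insert (bQuant px) (bVal d px) := by
  funext d px
  unfold bAdd bVal
  cases h : d.get? (bQuant px) <;> simp

-- generic: a pair of option-valued folds related pointwise stay related
theorem foldl_option_rel {A S T : Type} (m : S → T) (F : Option S → A → Option S)
    (G : Option T → A → Option T)
    (hFn : ∀ x, F none x = none) (hGn : ∀ x, G none x = none)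
    (hstep : ∀ s x, G (some (m s)) x = (F (some s) x).map m) :
    ∀ (l : List A) (ob : Option S) (oc : Option T), oc = ob.map m →
      l.foldl G oc = (l.foldl F ob).map m := by
  intro l
  induction l with
  | nil => intro ob oc h; simpa using h
  | cons a t ih =>
    intro ob oc h
    cases ob with
    | none =>
      simp at h; subst h
      rw [List.foldl_cons, List.foldl_cons, hGn, hFn]
      exact ih none none rfl
    | some s =>
      simp at h; subst h
      rw [List.foldl_cons, List.foldl_cons]
      exact ih (F (some s) a) _ (hstep s a)

theorem bBody_aBody (pixels : List (Int × Int × Int)) (s : List (Int × Int × Int)) (i1 i2 : Int) :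
    bBody pixels (some (s.foldl bAdd PySem.Dict.empty)) i1 i2
      = (aBody pixels (some s) i1 i2).map (fun b => b.foldl bAdd PySem.Dict.empty) := by
  unfold bBody aBody
  cases h1 : PySem.List.pyGet? pixels i1 <;> cases h2 : PySem.List.pyGet? pixels i2 <;>
    simp [List.foldl_append]

-- B's aggregation dict, per key
theorem mfilter_cons (k : Int × Int × Int) (px : Int × Int × Int) (l : List (Int × Int × Int)) :
    mfilter k (px :: l) = if bQuant px = k then px :: mfilter k l else mfilter k l := by
  show List.filter (fun px => bQuant px == k) (px :: l) = _
  rw [List.filter_cons]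
  by_cases h : bQuant px = k <;> simp [h] <;> rfl

theorem fold_getD (l : List (Int × Int × Int)) :
    ∀ (d : PySem.Dict (Int × Int × Int) (Int × Int × Int × Int)) (k : Int × Int × Int),
      (l.foldl bAdd d).getD k (0, 0, 0, 0) =
        ((d.getD k (0, 0, 0, 0)).1 + pcnt k l,
         (d.getD k (0, 0, 0, 0)).2.1 + ((mfilter k l).map (fun px => px.1)).sum,
         (d.getD k (0, 0, 0, 0)).2.2.1 + ((mfilter k l).map (fun px => px.2.1)).sum,
         (d.getD k (0, 0, 0, 0)).2.2.2 + ((mfilter k l).map (fun px => px.2.2)).sum) := by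
  induction l with
  | nil => intro d k; simp [pcnt, mfilter]
  | cons px t ih =>
    intro d k
    rw [List.foldl_cons, ih (bAdd d px) k]
    by_cases hk : bQuant px = k
    · subst hk
      have hbd : (bAdd d px).getD (bQuant px) (0, 0, 0, 0) =
          ((d.getD (bQuant px) (0, 0, 0, 0)).1 + 1,
           (d.getD (bQuant px) (0, 0, 0, 0)).2.1 + px.1,
           (d.getD (bQuant px) (0, 0, 0, 0)).2.2.1 + px.2.1,
           (d.getD (bQuant px) (0, 0, 0, 0)).2.2.2 + px.2.2) := by
        unfold bAdd
        cases h : d.get? (bQuant px) with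
        | none => simp [PySem.Dict.getD_insert_self, PySem.Dict.getD_of_get?_eq_none _ _ h]
        | some s => simp [PySem.Dict.getD_insert_self, PySem.Dict.getD_of_get?_eq_some _ _ h]
      rw [hbd, mfilter_cons]
      simp [pcnt, mfilter_cons]
      omega
    · have hbd : (bAdd d px).getD k (0, 0, 0, 0) = d.getD k (0, 0, 0, 0) := by
        unfold bAdd
        cases h : d.get? (bQuant px) <;>
          exact PySem.Dict.getD_insert_of_ne _ _ _ (fun h' => hk h'.symm)
      rw [hbd, mfilter_cons, if_neg hk]
      simp [pcnt, mfilter_cons, hk]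

theorem fold_keys (l : List (Int × Int × Int)) :
    (l.foldl bAdd PySem.Dict.empty).keys = PySem.Set.ofList (l.map bQuant) := by
  rw [bAdd_eq_insert, PySem.Dict.keys_foldl_insert_key]
  simp [PySem.Set.update_nil_left]

theorem fold_nodup (l : List (Int × Int × Int)) :
    (l.foldl bAdd PySem.Dict.empty).keys.Nodup := by
  rw [bAdd_eq_insert]
  exact PySem.Dict.nodup_keys_foldl_insert_key l bQuant bVal PySem.Dict.empty (by simp)

theorem fold_values (l : List (Int × Int × Int)) :
    (l.foldl bAdd PySem.Dict.empty).values
      = (PySem.Set.ofList (l.map bQuant)).map (fun k => pstat k l) := by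
  rw [PySem.Dict.values_eq_map_keys _ (fold_nodup l) (0, 0, 0, 0), fold_keys]
  apply List.map_congr_left
  intro k hk
  rw [fold_getD l PySem.Dict.empty k]
  simp [pstat, PySem.Dict.getD_empty]

-- B's strict-greater scan and A's max? both commute with mapping the carried key
def kstep (border : List (Int × Int × Int)) :
    Option (Int × Int × Int) → (Int × Int × Int) → Option (Int × Int × Int) :=
  fun acc k => match acc with
    | none => some k
    | some m => if pcnt m border < pcnt k border then some k else some m

theorem foldl_scan_map {K V : Type} (g : K → V) (stepV : Option V → V → Option V)
    (stepK : Option K → K → Option K)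
    (h : ∀ (k? : Option K) (k : K), stepV (k?.map g) (g k) = (stepK k? k).map g)
    (S : List K) : ∀ (k? : Option K) (i : Option V), i = k?.map g →
      (S.map g).foldl stepV i = (S.foldl stepK k?).map g := by
  induction S with
  | nil => intro k? i hi; simpa using hi
  | cons a t ih =>
    intro k? i hi
    rw [List.map_cons, List.foldl_cons, List.foldl_cons, hi, h k? a]
    exact ih (stepK k? a) _ rfl

theorem foldl_choice_some {K : Type} (step : Option K → K → Option K)
    (hstep : ∀ m a, step (some m) a = some a ∨ step (some m) a = some m) :
    ∀ (t : List K) (m : K), ∃ k, t.foldl step (some m) = some k ∧ (k = m ∨ k ∈ t) := by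
  intro t
  induction t with
  | nil => intro m; exact ⟨m, rfl, Or.inl rfl⟩
  | cons a t ih =>
    intro m
    rcases hstep m a with h | h <;> rw [List.foldl_cons, h]
    · obtain ⟨k, hk, hmem⟩ := ih a
      exact ⟨k, hk, Or.inr (by rcases hmem with h' | h' <;> simp [h'])⟩
    · obtain ⟨k, hk, hmem⟩ := ih m
      exact ⟨k, hk, by rcases hmem with h' | h' <;> simp [h']⟩

theorem core_eq (border : List (Int × Int × Int)) :
    aCore border = bCore (border.foldl bAdd PySem.Dict.empty) := by
  have hitems : (PySem.Dict.counter (border.map (fun px => quantize_color px 8))).items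
      = (PySem.Set.ofList (border.map bQuant)).map (fun k => (k, pcnt k border)) := by
    have hq : (fun (px : Int × Int × Int) => quantize_color px 8) = bQuant := rfl
    rw [hq, PySem.Dict.items_counter]
    apply List.map_congr_left
    intro k hk
    have : (border.map bQuant).count k = (mfilter k border).length := by
      rw [List.count_eq_countP, List.countP_map, List.countP_eq_length_filter]; rfl
    simp [pcnt, this]
  have hvalues := fold_values border
  simp only [aCore, bCore, PySem.List.max?]
  rw [hitems, hvalues]
  rw [foldl_scan_map (fun k => (k, pcnt k border)) _ (kstep border) ?hA
      (PySem.Set.ofList (border.map bQuant)) none none rfl]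
  case hA =>
    intro k? k
    cases k? with
    | none => rfl
    | some m =>
      simp only [Option.map_some, kstep]
      by_cases hc : pcnt m border < pcnt k border <;> simp [hc]
  rw [foldl_scan_map (fun k => pstat k border) _ (kstep border) ?hB
      (PySem.Set.ofList (border.map bQuant)) none none rfl]
  case hB =>
    intro k? k
    cases k? with
    | none => rfl
    | some m =>
      simp only [Option.map_some, kstep, pstat]
      by_cases hc : pcnt m border < pcnt k border <;> simp [hc]
  cases hfold : (PySem.Set.ofList (border.map bQuant)).foldl (kstep border) none with
  | none => rfl
  | some k0 =>
    have hmem : k0 ∈ PySem.Set.ofList (border.map bQuant) := by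
      cases hS : PySem.Set.ofList (border.map bQuant) with
      | nil => rw [hS] at hfold; simp at hfold
      | cons a t =>
        rw [hS] at hfold
        rw [List.foldl_cons] at hfold
        obtain ⟨k, hk, hor⟩ := foldl_choice_some (kstep border)
          (by intro m b; simp only [kstep]; split <;> simp) t a
        rw [show kstep border none a = some a from rfl] at hfold
        rw [hk] at hfold
        cases hfold
        rcases hor with h | h <;> simp [h]
    have hpx : ∃ px ∈ border, bQuant px = k0 := by
      have := (PySem.Set.mem_ofList (xs := border.map bQuant) (y := k0)).mp hmem
      simpa using this
    obtain ⟨px, hpxmem, hpxq⟩ := hpx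
    have hmf : px ∈ mfilter k0 border := by
      unfold mfilter
      rw [List.mem_filter]
      exact ⟨hpxmem, by show (bQuant px == k0) = true; simp [hpxq]⟩
    have hne : mfilter k0 border ≠ [] := List.ne_nil_of_mem hmf
    have hmatched : border.filter (fun px => quantize_color px 8 == k0) = mfilter k0 border := rfl
    simp only [Option.map_some]
    show (let matched := border.filter (fun px => quantize_color px 8 == k0); _) = _
    rw [hmatched]
    simp only [if_neg hne]
    rfl

-- ===== VERDICT (by name: the statement is the Claim_ definition above) =====
theorem estimate_background_color_spec : Claim_equal_estimate_background_color := by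
  intro pixels w h_ _dom _pre
  unfold Spec_estimate_background_color
  simp only [estimate_background_color, estimate_background_color_alt]
  have h1 : (PySem.List.pyRange 0 w 1).foldl
        (fun acc x => bBody pixels acc x ((h_ - 1) * w + x)) (some PySem.Dict.empty)
      = ((PySem.List.pyRange 0 w 1).foldl
          (fun acc x => aBody pixels acc x ((h_ - 1) * w + x)) (some [])).map
            (fun b => b.foldl bAdd PySem.Dict.empty) :=
    foldl_option_rel (fun b => b.foldl bAdd PySem.Dict.empty) _ _
      (by intro x; unfold aBody
          cases PySem.List.pyGet? pixels x <;> cases PySem.List.pyGet? pixels ((h_ - 1) * w + x) <;> rfl)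
      (by intro x; unfold bBody
          cases PySem.List.pyGet? pixels x <;> cases PySem.List.pyGet? pixels ((h_ - 1) * w + x) <;> rfl)
      (fun s x => bBody_aBody pixels s x ((h_ - 1) * w + x))
      (PySem.List.pyRange 0 w 1) (some []) (some PySem.Dict.empty) rfl
  have h2 : (PySem.List.pyRange 0 h_ 1).foldl
        (fun acc y => bBody pixels acc (y * w) (y * w + (w - 1)))
        ((PySem.List.pyRange 0 w 1).foldl
          (fun acc x => bBody pixels acc x ((h_ - 1) * w + x)) (some PySem.Dict.empty))
      = ((PySem.List.pyRange 0 h_ 1).foldl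
          (fun acc y => aBody pixels acc (y * w) (y * w + (w - 1)))
          ((PySem.List.pyRange 0 w 1).foldl
            (fun acc x => aBody pixels acc x ((h_ - 1) * w + x)) (some []))).map
            (fun b => b.foldl bAdd PySem.Dict.empty) :=
    foldl_option_rel (fun b => b.foldl bAdd PySem.Dict.empty) _ _
      (by intro y; unfold aBody
          cases PySem.List.pyGet? pixels (y * w) <;> cases PySem.List.pyGet? pixels (y * w + (w - 1)) <;> rfl)
      (by intro y; unfold bBody
          cases PySem.List.pyGet? pixels (y * w) <;> cases PySem.List.pyGet? pixels (y * w + (w - 1)) <;> rfl)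
      (fun s y => bBody_aBody pixels s (y * w) (y * w + (w - 1)))
      (PySem.List.pyRange 0 h_ 1) _ _ h1
  rw [h2]
  cases hb : (PySem.List.pyRange 0 h_ 1).foldl
      (fun acc y => aBody pixels acc (y * w) (y * w + (w - 1)))
      ((PySem.List.pyRange 0 w 1).foldl
        (fun acc x => aBody pixels acc x ((h_ - 1) * w + x)) (some [])) with
  | none => rfl
  | some border => exact core_eq border
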